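-- pv_equiv track=rewrite | github.com/pjucm/pyfm | rds_decoder.py | compute_syndrome
-- ===== SOURCE A (Python) =====
-- CRC_POLY = 0x1B9
--
-- def compute_syndrome(block_26bit):
--     """
--     Compute syndrome for a 26-bit RDS block.
--
--     The syndrome is the remainder when dividing the received block
--     by the CRC polynomial. For a valid block, the syndrome equals
--     the offset word for that block position.
--     """
--     reg = 0
--     for i in range(25, -1, -1):
--         bit = (block_26bit >> i) & 1
--         feedback = (reg >> 9) & 1
--         reg = ((reg << 1) | bit) & 0x3FF
--         if feedback:
--             reg ^= CRC_POLY
--     return reg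
-- ===== SOURCE B (Python) =====
-- def compute_syndrome(block_26bit):
--     """
--     Compute syndrome for a 26-bit RDS block by direct modulo-2 polynomial
--     long division: clear the dividend's high bits in place by XORing shifted
--     copies of the full generator g = x^10 + CRC_POLY = 0x5B9.
--     """
--     rem = block_26bit & 0x3FFFFFF
--     g = 0x5B9
--     for i in range(25, 9, -1):
--         if (rem >> i) & 1:
--             rem ^= g << (i - 10)
--     return rem
-- ===== Notes on version B (the rewrite author's own statement) =====
-- stated objective: alternative
-- what changed: Replaced the LFSR shift register (shift one message bit per iteration into a ten-bit register, XOR the feedback polynomial on overflow) by modulo-2 polynomial long division on the masked message word: each high bit is cleared in place by XORing a shifted copy of the full generator 0x5B9, so no shift register is maintained and fewer iterations are needed.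
import Mathlib
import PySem

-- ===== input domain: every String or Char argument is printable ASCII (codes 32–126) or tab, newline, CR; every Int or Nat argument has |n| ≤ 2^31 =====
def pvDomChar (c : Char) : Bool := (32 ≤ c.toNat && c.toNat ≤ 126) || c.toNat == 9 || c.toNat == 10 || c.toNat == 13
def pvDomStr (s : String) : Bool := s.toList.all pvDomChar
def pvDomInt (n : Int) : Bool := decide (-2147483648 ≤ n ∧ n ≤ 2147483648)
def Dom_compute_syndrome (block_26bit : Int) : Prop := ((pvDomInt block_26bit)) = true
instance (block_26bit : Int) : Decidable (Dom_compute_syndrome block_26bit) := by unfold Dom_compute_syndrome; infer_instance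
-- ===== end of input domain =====

-- B replaces A's 26-step LFSR shift register by 16-step modulo-2 polynomial long
-- division on the masked 26-bit word (objective: alternative algorithm, same cost class).

-- ===== PORT A =====
def CRC_POLY : Int := 0x1B9

def compute_syndrome (block_26bit : Int) : Int :=
  -- for i in range(25, -1, -1): ...   (i is nonnegative throughout, so i.toNat is exact)
  (PySem.List.pyRange 25 (-1) (-1)).foldl
    (fun reg i =>
      let bit := PySem.Int.band (block_26bit >>> i.toNat) 1
      let feedback := PySem.Int.band (reg >>> 9) 1
      let reg2 := PySem.Int.band (PySem.Int.bor (reg <<< 1) bit) 0x3FF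
      if feedback ≠ 0 then PySem.Int.bxor reg2 CRC_POLY else reg2)
    0

-- ===== PORT B =====
def compute_syndrome_alt (block_26bit : Int) : Int :=
  let g : Int := 0x5B9
  -- for i in range(25, 9, -1): ...   (i - 10 is nonnegative throughout, so (i-10).toNat is exact)
  (PySem.List.pyRange 25 9 (-1)).foldl
    (fun rem i =>
      if PySem.Int.band (rem >>> i.toNat) 1 ≠ 0 then PySem.Int.bxor rem (g <<< (i - 10).toNat)
      else rem)
    (PySem.Int.band block_26bit 0x3FFFFFF)

-- ===== PRECONDITION & SPEC =====
def Spec_compute_syndrome (block_26bit : Int) (out : Int) : Prop := out = compute_syndrome_alt block_26bit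
instance (block_26bit : Int) (out : Int) : Decidable (Spec_compute_syndrome block_26bit out) := by unfold Spec_compute_syndrome; infer_instance

-- ===== CLAIM (what is proved, stated in full; the proofs are below) =====
def Claim_equal_compute_syndrome : Prop := ∀ (block_26bit : Int), Dom_compute_syndrome block_26bit → Spec_compute_syndrome block_26bit (compute_syndrome block_26bit)

-- ===== LEMMAS AND PROOFS =====

-- Nat-valued models of the two loops, over the masked message m = block mod 2^26.
def pvBit (m k : Nat) : Nat := (m >>> k) &&& 1

def pvAStep (m r k : Nat) : Nat :=
  (((r <<< 1) ^^^ pvBit m k) &&& 1023) ^^^ (if pvBit r 9 = 1 then 441 else 0)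

def pvAIdx : List Nat := [25,24,23,22,21,20,19,18,17,16,15,14,13,12,11,10,9,8,7,6,5,4,3,2,1,0]

def pvARun (m : Nat) : Nat := pvAIdx.foldl (pvAStep m) 0

def pvBStep (r k : Nat) : Nat := if pvBit r k = 1 then r ^^^ (1465 <<< (k - 10)) else r

def pvBIdx : List Nat := [25,24,23,22,21,20,19,18,17,16,15,14,13,12,11,10]

def pvBRun (m : Nat) : Nat := pvBIdx.foldl pvBStep m

theorem pvBit_le_one (m k : Nat) : pvBit m k ≤ 1 := Nat.and_le_right

theorem pvBit_xor (x y k : Nat) : pvBit (x ^^^ y) k = pvBit x k ^^^ pvBit y k := by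
  unfold pvBit
  rw [Nat.shiftRight_xor_distrib, Nat.and_xor_distrib_right]

theorem pv_ite_xor (a b P : Nat) (ha : a ≤ 1) (hb : b ≤ 1) :
    (if a ^^^ b = 1 then P else 0) = (if a = 1 then P else 0) ^^^ (if b = 1 then P else 0) := by
  interval_cases a <;> interval_cases b <;> simp

theorem pv_or_bit (x b : Nat) (hb : b ≤ 1) : (x <<< 1) ||| b = (x <<< 1) ^^^ b := by
  apply Nat.eq_of_testBit_eq
  intro i
  cases i with
  | zero =>
      rw [Nat.shiftLeft_eq]
      simp only [Nat.testBit_zero]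
      simp
  | succ j =>
      have hb' : b.testBit (j + 1) = false := Nat.testBit_lt_two_pow (by
        calc b ≤ 1 := hb
        _ < 2 ^ (j + 1) := Nat.one_lt_two_pow (by omega))
      simp [Nat.testBit_or, Nat.testBit_xor, hb']

theorem pvAStep_linear (x y r s k : Nat) :
    pvAStep (x ^^^ y) (r ^^^ s) k = pvAStep x r k ^^^ pvAStep y s k := by
  unfold pvAStep
  rw [pvBit_xor, pvBit_xor, Nat.shiftLeft_xor_distrib,
      pv_ite_xor _ _ _ (pvBit_le_one r 9) (pvBit_le_one s 9)]
  have h : (r <<< 1 ^^^ s <<< 1) ^^^ (pvBit x k ^^^ pvBit y k)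
      = ((r <<< 1) ^^^ pvBit x k) ^^^ ((s <<< 1) ^^^ pvBit y k) := by
    simp [Nat.xor_assoc, Nat.xor_comm, Nat.xor_left_comm]
  rw [h, Nat.and_xor_distrib_right]
  simp [Nat.xor_assoc, Nat.xor_comm, Nat.xor_left_comm]

theorem pvBStep_eq (r k : Nat) : pvBStep r k = r ^^^ (if pvBit r k = 1 then 1465 <<< (k - 10) else 0) := by
  unfold pvBStep
  split <;> simp

theorem pvBStep_linear (r s k : Nat) : pvBStep (r ^^^ s) k = pvBStep r k ^^^ pvBStep s k := by
  rw [pvBStep_eq, pvBStep_eq, pvBStep_eq, pvBit_xor,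
      pv_ite_xor _ _ _ (pvBit_le_one r k) (pvBit_le_one s k)]
  simp [Nat.xor_assoc, Nat.xor_comm, Nat.xor_left_comm]

theorem pvAFold_linear (l : List Nat) (x y r s : Nat) :
    l.foldl (pvAStep (x ^^^ y)) (r ^^^ s) = l.foldl (pvAStep x) r ^^^ l.foldl (pvAStep y) s := by
  induction l generalizing r s with
  | nil => rfl
  | cons k t ih => simpa [List.foldl, pvAStep_linear] using ih (pvAStep x r k) (pvAStep y s k)

theorem pvBFold_linear (l : List Nat) (r s : Nat) :
    l.foldl pvBStep (r ^^^ s) = l.foldl pvBStep r ^^^ l.foldl pvBStep s := by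
  induction l generalizing r s with
  | nil => rfl
  | cons k t ih => simpa [List.foldl, pvBStep_linear] using ih (pvBStep r k) (pvBStep s k)

theorem pvARun_linear (x y : Nat) : pvARun (x ^^^ y) = pvARun x ^^^ pvARun y := by
  have := pvAFold_linear pvAIdx x y 0 0
  simpa [pvARun] using this

theorem pvBRun_linear (x y : Nat) : pvBRun (x ^^^ y) = pvBRun x ^^^ pvBRun y := by
  exact pvBFold_linear pvBIdx x y

theorem pv_base : ∀ k : Nat, k < 26 → pvARun (2 ^ k) = pvBRun (2 ^ k) := by decide

theorem pv_core : ∀ m : Nat, m < 2 ^ 26 → pvARun m = pvBRun m := by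
  intro m
  induction m using Nat.strong_induction_on with
  | _ m ih =>
    intro hm
    rcases Nat.eq_zero_or_pos m with h0 | hpos
    · subst h0; decide
    · have hne : m ≠ 0 := Nat.pos_iff_ne_zero.mp hpos
      set k := Nat.log2 m with hk
      have hk26 : k < 26 := by
        rw [hk, Nat.log2_lt hne]; exact hm
      have hle : 2 ^ k ≤ m := by rw [hk]; exact Nat.log2_self_le hne
      have hlt : m < 2 ^ (k + 1) := by rw [hk]; exact Nat.lt_log2_self
      set m' := m ^^^ 2 ^ k with hm'
      have hm'lt : m' < 2 ^ k := by
        apply Nat.lt_pow_two_of_testBit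
        intro j hj
        by_cases hjk : j = k
        · rw [hjk]
          have h1 : m.testBit k = true :=
            Nat.testBit_of_two_pow_le_and_two_pow_add_one_gt hle hlt
          simp [hm', Nat.testBit_xor, h1, Nat.testBit_two_pow_self]
        · have hj' : k < j := by omega
          have h1 : m.testBit j = false := Nat.testBit_lt_two_pow (by
            calc m < 2 ^ (k + 1) := hlt
            _ ≤ 2 ^ j := Nat.pow_le_pow_right (by norm_num) hj')
          have h2 : (2 ^ k).testBit j = false := Nat.testBit_lt_two_pow
            (Nat.pow_lt_pow_right (by norm_num) hj')
          simp [hm', Nat.testBit_xor, h1, h2]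
      have hm'm : m' < m := lt_of_lt_of_le hm'lt hle
      have hmm : m = 2 ^ k ^^^ m' := by
        rw [hm', Nat.xor_comm m (2 ^ k), ← Nat.xor_assoc]
        simp
      rw [hmm, pvARun_linear, pvBRun_linear, pv_base k hk26]
      rw [ih m' hm'm (lt_trans hm'm hm)]

-- Bridges: each port equals its Nat model on m = block mod 2^26.
theorem pv_cast_shiftRight (a k : Nat) : ((a : Int) >>> k) = ((a >>> k : Nat) : Int) := by
  simp [Int.shiftRight_eq_div_pow, Nat.shiftRight_eq_div_pow]

theorem pv_cast_shiftLeft (a k : Nat) : ((a : Int) <<< k) = ((a <<< k : Nat) : Int) := by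
  simp [Int.shiftLeft_eq, Nat.shiftLeft_eq]

theorem pv_mask (a : Int) : PySem.Int.band a 0x3FFFFFF = ((a % 67108864).toNat : Int) := by
  have hmask : a.toNat &&& 67108863 = a.toNat % 67108864 := by
    have := Nat.and_two_pow_sub_one_eq_mod a.toNat 26
    norm_num at this
    exact this
  have hd : a % 67108864 = a - 67108864 * (a / 67108864) := Int.emod_def a 67108864
  have ht : Int.toNat 67108863 = 67108863 := rfl
  by_cases ha : 0 ≤ a
  · rw [PySem.Int.band_of_nonneg ha (by norm_num)]
    show ((a.toNat &&& Int.toNat 67108863 : Nat) : Int) = _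
    rw [ht, hmask]
    omega
  · set n := (-a - 1).toNat with hn
    have hmask2 : 67108863 &&& n = n % 67108864 := by
      rw [Nat.and_comm]
      have := Nat.and_two_pow_sub_one_eq_mod n 26
      norm_num at this
      exact this
    simp only [PySem.Int.band, if_neg ha, if_pos (by norm_num : (0:Int) ≤ (0x3FFFFFF:Int))]
    rw [ht, hmask2]
    omega

theorem pv_two_pow_factor (k : Nat) (hk : k < 26) :
    (67108864:Int) = 2 ^ k * (2 * 2 ^ (25 - k)) := by
  have h : k + (1 + (25 - k)) = 26 := by omega
  calc (67108864:Int) = 2 ^ 26 := by norm_num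
  _ = 2 ^ (k + (1 + (25 - k))) := by rw [h]
  _ = 2 ^ k * (2 ^ 1 * 2 ^ (25 - k)) := by rw [pow_add, pow_add]
  _ = 2 ^ k * (2 * 2 ^ (25 - k)) := by norm_num

theorem pv_bitA (a : Int) (k : Nat) (hk : k < 26) :
    PySem.Int.band (a >>> k) 1 = ((pvBit (a % 67108864).toNat k : Nat) : Int) := by
  rw [PySem.Int.band_one, PySem.Int.mod_eq_emod_of_pos (by norm_num), Int.shiftRight_eq_div_pow]
  unfold pvBit
  rw [Nat.and_one_is_mod, Nat.shiftRight_eq_div_pow]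
  have hnn : (0:Int) ≤ a % 67108864 := Int.emod_nonneg a (by norm_num)
  push_cast
  rw [Int.toNat_of_nonneg hnn]
  -- (a % 2^26) / 2^k has the same parity as a / 2^k because 2^26 = 2^k * (even)
  have hd : a % 67108864 = a + 2 ^ k * (2 * (2 ^ (25 - k) * -(a / 67108864))) := by
    rw [Int.emod_def]
    rw [pv_two_pow_factor k hk]
    ring
  rw [hd, Int.add_mul_ediv_left _ _ (by positivity : ((2:Int) ^ k) ≠ 0)]
  rw [Int.add_mul_emod_self_left]

theorem pv_foldl_lift (f : Int → Int → Int) (g : Nat → Nat → Nat) (l : List Nat)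
    (hfg : ∀ (r k : Nat), k ∈ l → f ((r : Nat) : Int) ((k : Nat) : Int) = (((g r k : Nat)) : Int))
    (r : Nat) :
    (l.map (fun (k : Nat) => (k : Int))).foldl f ((r : Nat) : Int) = ((l.foldl g r : Nat) : Int) := by
  induction l generalizing r with
  | nil => rfl
  | cons k t ih =>
      rw [List.map_cons, List.foldl_cons, List.foldl_cons]
      rw [hfg r k (by simp)]
      exact ih (fun r k hk => hfg r k (by simp [hk])) (g r k)

theorem pv_sr9 (r : Nat) : ((r : Int) >>> (9:Int)) = ((r >>> 9 : Nat) : Int) := by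
  have h : ((9:Int)) = (((9:Nat)) : Int) := by norm_num
  rw [h, Int.shiftRight_natCast_right]
  exact pv_cast_shiftRight r 9

theorem pv_sl1 (r : Nat) : ((r : Int) <<< (1:Int)) = ((r <<< 1 : Nat) : Int) := by
  have h : ((1:Int)) = (((1:Nat)) : Int) := by norm_num
  rw [h, Int.shiftLeft_natCast_right]
  exact pv_cast_shiftLeft r 1

theorem pv_bridgeA (block : Int) :
    compute_syndrome block = ((pvARun (block % 67108864).toNat : Nat) : Int) := by
  unfold compute_syndrome pvARun
  have hidx : PySem.List.pyRange 25 (-1) (-1) = pvAIdx.map (fun (k : Nat) => (k : Int)) := by decide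
  rw [hidx]
  have h0 : (0:Int) = (((0:Nat)) : Int) := by norm_num
  rw [h0]
  apply pv_foldl_lift
  intro r k hk
  have hk26 : k < 26 := by
    simp [pvAIdx] at hk
    omega
  simp only [Int.toNat_natCast, Int.shiftRight_natCast_right]
  unfold pvAStep
  rw [pv_bitA block k hk26, pv_sr9 r, pv_sl1 r]
  have hfb : PySem.Int.band ((r >>> 9 : Nat) : Int) 1 = ((pvBit r 9 : Nat) : Int) := by
    have := PySem.Int.band_natCast (r >>> 9) 1
    unfold pvBit
    exact_mod_cast this
  rw [hfb]
  have hbor : PySem.Int.bor ((r <<< 1 : Nat) : Int) ((pvBit (block % 67108864).toNat k : Nat) : Int)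
      = (((r <<< 1) ||| pvBit (block % 67108864).toNat k : Nat) : Int) := PySem.Int.bor_natCast _ _
  rw [hbor]
  have hband : PySem.Int.band (((r <<< 1) ||| pvBit (block % 67108864).toNat k : Nat) : Int) 1023
      = ((((r <<< 1) ||| pvBit (block % 67108864).toNat k) &&& 1023 : Nat) : Int) := by
    have := PySem.Int.band_natCast ((r <<< 1) ||| pvBit (block % 67108864).toNat k) 1023
    exact_mod_cast this
  rw [hband, pv_or_bit _ _ (pvBit_le_one _ _)]
  have hb9 := pvBit_le_one r 9
  unfold CRC_POLY
  split_ifs with hc1 hc2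
  · exact_mod_cast PySem.Int.bxor_natCast (((r <<< 1) ^^^ pvBit (block % 67108864).toNat k) &&& 1023) 441
  · exfalso; omega
  · exfalso; omega
  · simp

theorem pv_bridgeB (block : Int) :
    compute_syndrome_alt block = ((pvBRun (block % 67108864).toNat : Nat) : Int) := by
  unfold compute_syndrome_alt pvBRun
  have hidx : PySem.List.pyRange 25 9 (-1) = pvBIdx.map (fun (k : Nat) => (k : Int)) := by decide
  rw [hidx, pv_mask]
  apply pv_foldl_lift
  intro r k hk
  have hk10 : 10 ≤ k := by
    simp [pvBIdx] at hk
    omega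
  simp only [Int.toNat_natCast, Int.shiftRight_natCast_right, Int.shiftLeft_natCast_right]
  unfold pvBStep
  have hbit : PySem.Int.band ((r : Int) >>> k) 1 = ((pvBit r k : Nat) : Int) := by
    rw [pv_cast_shiftRight r k]
    have := PySem.Int.band_natCast (r >>> k) 1
    unfold pvBit
    exact_mod_cast this
  rw [hbit]
  have htn : ((k : Int) - 10).toNat = k - 10 := by omega
  rw [htn]
  have hsl : ((0x5B9:Int)) <<< (k - 10) = ((1465 <<< (k - 10) : Nat) : Int) := by
    have := pv_cast_shiftLeft 1465 (k - 10)
    exact_mod_cast this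
  rw [hsl]
  have hbk := pvBit_le_one r k
  split_ifs with hc1 hc2
  · exact_mod_cast PySem.Int.bxor_natCast r (1465 <<< (k - 10))
  · exfalso; omega
  · exfalso; omega
  · rfl

-- ===== VERDICT (by name: the statement is the Claim_ definition above) =====
theorem compute_syndrome_spec : Claim_equal_compute_syndrome := by
  intro block _
  unfold Spec_compute_syndrome
  rw [pv_bridgeA, pv_bridgeB]
  have h2 : block % 67108864 < 67108864 := Int.emod_lt_of_pos block (by norm_num)
  have h3 : 0 ≤ block % 67108864 := Int.emod_nonneg block (by norm_num)
  have h4 : (block % 67108864).toNat < 2 ^ 26 := by omega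
  exact congrArg (fun n : Nat => (n : Int)) (pv_core _ h4)
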